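-- pv_equiv track=rewrite | github.com/gikf/advent-of-code | advent-of-code-2016/day 20/main.py | find_allowed
-- ===== SOURCE A (Python) =====
-- def find_allowed(ranges, limit=4294967295):
--     """Find allowed IPs for ranges and with limit."""
--     last_number = 0
--     allowed = []
--     for minimum, maximum in ranges:
--         if last_number + 1 >= minimum:
--             last_number = max(last_number, maximum)
--         else:
--             while last_number + 1 < minimum:
--                 allowed.append(last_number + 1)
--                 last_number += 1
--             last_number = maximum
--     while last_number < limit:
--         allowed.append(last_number + 1)
--         last_number += 1
--     return allowed
-- ===== SOURCE B (Python) =====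
-- def find_allowed(ranges, limit=4294967295):
--     """Find allowed IPs for ranges and with limit."""
--     # Pass 1: merge ranges into gap boundaries (lo, hi): the blocked run ends at lo,
--     # the next blocked run starts at hi; allowed numbers are lo+1 .. hi-1.
--     gaps = []
--     last = 0
--     for minimum, maximum in ranges:
--         if last + 1 >= minimum:
--             last = max(last, maximum)
--         else:
--             gaps.append((last, minimum))
--             last = maximum
--     gaps.append((last, limit + 1))
--     # Pass 2: materialize the complement from the gap list.
--     allowed = []
--     for lo, hi in gaps:
--         allowed.extend(range(lo + 1, hi))
--     return allowed
-- ===== Notes on version B (the rewrite author's own statement) =====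
-- stated objective: alternative
-- what changed: A interleaves merging and element emission in one pass with nested while-loops appending one number at a time; B separates the work into two passes: first build a list of (gap-start, gap-end) boundary pairs, then materialize each gap with range/extend.
import Mathlib
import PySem

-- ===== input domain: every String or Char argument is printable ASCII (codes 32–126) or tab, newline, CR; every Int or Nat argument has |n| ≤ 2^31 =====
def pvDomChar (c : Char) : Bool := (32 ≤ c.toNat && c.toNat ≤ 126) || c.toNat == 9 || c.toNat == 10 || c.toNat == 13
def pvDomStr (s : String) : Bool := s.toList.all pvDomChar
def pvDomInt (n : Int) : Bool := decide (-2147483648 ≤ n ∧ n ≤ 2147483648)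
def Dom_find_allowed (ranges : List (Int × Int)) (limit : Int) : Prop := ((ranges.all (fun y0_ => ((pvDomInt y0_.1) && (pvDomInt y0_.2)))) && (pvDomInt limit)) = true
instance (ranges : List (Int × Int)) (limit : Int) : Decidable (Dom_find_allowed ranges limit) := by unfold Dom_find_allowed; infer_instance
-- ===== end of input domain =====

-- B separates A's single interleaved merge-and-emit pass into two passes: one building
-- a gap-boundary list, one materializing each gap via range; objective: alternative decomposition.


-- ===== PORT A =====
-- inner 'while last_number + 1 < minimum: allowed.append(last_number+1); last_number += 1'
def pvWhileGap (last minimum : Int) (allowed : List Int) : Int × List Int :=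
  if last + 1 < minimum then pvWhileGap (last + 1) minimum (allowed ++ [last + 1])
  else (last, allowed)
termination_by (minimum - last).toNat
decreasing_by omega

-- trailing 'while last_number < limit: allowed.append(last_number+1); last_number += 1'
def pvWhileFill (last limit : Int) (allowed : List Int) : Int × List Int :=
  if last < limit then pvWhileFill (last + 1) limit (allowed ++ [last + 1])
  else (last, allowed)
termination_by (limit - last).toNat
decreasing_by omega

def find_allowed (ranges : List (Int × Int)) (limit : Int) : List Int :=
  let st := ranges.foldl (fun (st : Int × List Int) p =>
    if st.1 + 1 ≥ p.1 then (max st.1 p.2, st.2)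
    else
      let w := pvWhileGap st.1 p.1 st.2
      (p.2, w.2)) (0, [])
  (pvWhileFill st.1 limit st.2).2

-- ===== PORT B =====
-- pass 1: fold over ranges building the gap-boundary list
def pvGapPass (ranges : List (Int × Int)) (st : Int × List (Int × Int)) : Int × List (Int × Int) :=
  ranges.foldl (fun (st : Int × List (Int × Int)) p =>
    if st.1 + 1 ≥ p.1 then (max st.1 p.2, st.2)
    else (p.2, st.2 ++ [(st.1, p.1)])) st

def find_allowed_alt (ranges : List (Int × Int)) (limit : Int) : List Int :=
  let st := pvGapPass ranges (0, [])
  let gaps := st.2 ++ [(st.1, limit + 1)]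
  -- pass 2: allowed.extend(range(lo + 1, hi)) for each gap
  gaps.foldl (fun out g => out ++ PySem.List.pyRange (g.1 + 1) g.2 1) []

-- ===== PRECONDITION & SPEC =====
def Spec_find_allowed (ranges : List (Int × Int)) (limit : Int) (out : List Int) : Prop := out = find_allowed_alt ranges limit
instance (ranges : List (Int × Int)) (limit : Int) (out : List Int) : Decidable (Spec_find_allowed ranges limit out) := by unfold Spec_find_allowed; infer_instance

-- ===== CLAIM (what is proved, stated in full; the proofs are below) =====
def Claim_equal_find_allowed : Prop := ∀ (ranges : List (Int × Int)) (limit : Int), Dom_find_allowed ranges limit → Spec_find_allowed ranges limit (find_allowed ranges limit)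

-- ===== LEMMAS AND PROOFS =====

-- named forms of the two folds (definitionally equal to the ports' folds)
def pvAFold (ranges : List (Int × Int)) (st : Int × List Int) : Int × List Int :=
  ranges.foldl (fun (st : Int × List Int) p =>
    if st.1 + 1 ≥ p.1 then (max st.1 p.2, st.2)
    else (p.2, (pvWhileGap st.1 p.1 st.2).2)) st

def pvMat (gaps : List (Int × Int)) : List Int :=
  gaps.foldl (fun out g => out ++ PySem.List.pyRange (g.1 + 1) g.2 1) []

theorem pvAFold_cons (p : Int × Int) (tl : List (Int × Int)) (st : Int × List Int) :
    pvAFold (p :: tl) st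
      = pvAFold tl (if st.1 + 1 ≥ p.1 then (max st.1 p.2, st.2)
                    else (p.2, (pvWhileGap st.1 p.1 st.2).2)) := rfl

theorem pvGapPass_cons (p : Int × Int) (tl : List (Int × Int)) (st : Int × List (Int × Int)) :
    pvGapPass (p :: tl) st
      = pvGapPass tl (if st.1 + 1 ≥ p.1 then (max st.1 p.2, st.2)
                      else (p.2, st.2 ++ [(st.1, p.1)])) := rfl

theorem pvMat_eq (gaps : List (Int × Int)) :
    pvMat gaps = gaps.flatMap (fun g => PySem.List.pyRange (g.1 + 1) g.2 1) := by
  simpa [pvMat] using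
    PySem.List.foldl_append_eq_flatMap (fun g : Int × Int => PySem.List.pyRange (g.1 + 1) g.2 1) gaps []

-- the inner while loop appends exactly range(last+1, minimum)
theorem pvWhileGap_eq (last minimum : Int) (allowed : List Int) :
    pvWhileGap last minimum allowed = (max last (minimum - 1), allowed ++ PySem.List.pyRange (last + 1) minimum 1) := by
  rw [pvWhileGap]
  split
  · rw [pvWhileGap_eq (last + 1) minimum (allowed ++ [last + 1])]
    rw [PySem.List.pyRange_one_cons (by omega : last + 1 < minimum)]
    simp only [Prod.mk.injEq]
    exact ⟨by omega, by simp⟩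
  · rw [PySem.List.pyRange_one_eq_nil (by omega : minimum ≤ last + 1)]
    simp only [Prod.mk.injEq]
    exact ⟨by omega, by simp⟩
termination_by (minimum - last).toNat
decreasing_by omega

-- the trailing while loop appends exactly range(last+1, limit+1)
theorem pvWhileFill_eq (last limit : Int) (allowed : List Int) :
    pvWhileFill last limit allowed = (max last limit, allowed ++ PySem.List.pyRange (last + 1) (limit + 1) 1) := by
  rw [pvWhileFill]
  split
  · rw [pvWhileFill_eq (last + 1) limit (allowed ++ [last + 1])]
    rw [PySem.List.pyRange_one_cons (by omega : last + 1 < limit + 1)]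
    simp only [Prod.mk.injEq]
    exact ⟨by omega, by simp⟩
  · rw [PySem.List.pyRange_one_eq_nil (by omega : limit + 1 ≤ last + 1)]
    simp only [Prod.mk.injEq]
    exact ⟨by omega, by simp⟩
termination_by (limit - last).toNat
decreasing_by omega

-- pass 1 accumulates its gap list by appending on the right
theorem pvGapPass_append (tl : List (Int × Int)) (last : Int) (g : List (Int × Int)) :
    pvGapPass tl (last, g) = ((pvGapPass tl (last, [])).1, g ++ (pvGapPass tl (last, [])).2) := by
  induction tl generalizing last g with
  | nil => simp [pvGapPass]
  | cons p tl ih =>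
    rw [pvGapPass_cons, pvGapPass_cons]
    dsimp only
    split
    · exact ih _ g
    · rw [ih p.2 (g ++ [(last, p.1)]), ih p.2 ([] ++ [(last, p.1)])]
      simp

-- A's merge pass equals B's pass 1 with the gap list materialized
theorem pass_eq (tl : List (Int × Int)) (last : Int) (acc : List Int) :
    pvAFold tl (last, acc)
      = ((pvGapPass tl (last, [])).1, acc ++ pvMat (pvGapPass tl (last, [])).2) := by
  induction tl generalizing last acc with
  | nil => simp [pvAFold, pvGapPass, pvMat]
  | cons p tl ih =>
    rw [pvAFold_cons, pvGapPass_cons]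
    dsimp only
    split
    · exact ih _ acc
    · rw [pvWhileGap_eq]
      dsimp only
      rw [ih p.2 (acc ++ PySem.List.pyRange (last + 1) p.1 1),
          pvGapPass_append tl p.2 ([] ++ [(last, p.1)])]
      simp [pvMat_eq, List.flatMap_cons]

-- ===== VERDICT (by name: the statement is the Claim_ definition above) =====
theorem find_allowed_spec : Claim_equal_find_allowed := by
  intro ranges limit _
  unfold Spec_find_allowed
  have hA : find_allowed ranges limit
      = (pvWhileFill (pvAFold ranges (0, [])).1 limit (pvAFold ranges (0, [])).2).2 := rfl
  have hB : find_allowed_alt ranges limit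
      = pvMat ((pvGapPass ranges (0, [])).2 ++ [((pvGapPass ranges (0, [])).1, limit + 1)]) := rfl
  rw [hA, hB, pass_eq, pvWhileFill_eq]
  simp [pvMat_eq, List.flatMap_append, List.flatMap_cons]
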